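-- pv_equiv track=rewrite | github.com/Antszz/TrabajosUniversidad | Seguridad/Formacion5/descTrancripcionInterrumpida.py | procesClave
-- ===== SOURCE A (Python) =====
-- def procesClave(clave):
-- 	lis = [0]*len(clave)
-- 	pos = [0]*(len(clave)+1)
-- 	for i in range(len(clave)):
-- 		x = 1
-- 		for j in range(0,i):
-- 			if(clave[j] <= clave[i]):
-- 				x += 1
-- 			else:
-- 				lis[j] += 1
-- 				pos[lis[j]] = j+1
-- 		lis[i] = x
-- 		pos[x] = i+1
-- 	return pos, lis
-- ===== SOURCE B (Python) =====
-- def procesClave(clave):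
--     # Stable sort the indices by value, then read off ranks and the inverse
--     # permutation in one pass (O(n log n) instead of A's O(n^2)).
--     n = len(clave)
--     order = sorted(range(n), key=lambda i: (clave[i], i))
--     lis = [0] * n
--     pos = [0] * (n + 1)
--     for r, i in enumerate(order, 1):
--         lis[i] = r
--         pos[r] = i + 1
--     return pos, lis
-- ===== Notes on version B (the rewrite author's own statement) =====
-- stated objective: faster
-- what changed: A computes each element's stable rank with a quadratic nested loop that keeps patching earlier ranks and pos slots; B stably sorts the indices once by (value, index) and reads off the ranks and the inverse permutation in a single pass.
import Mathlib
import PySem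

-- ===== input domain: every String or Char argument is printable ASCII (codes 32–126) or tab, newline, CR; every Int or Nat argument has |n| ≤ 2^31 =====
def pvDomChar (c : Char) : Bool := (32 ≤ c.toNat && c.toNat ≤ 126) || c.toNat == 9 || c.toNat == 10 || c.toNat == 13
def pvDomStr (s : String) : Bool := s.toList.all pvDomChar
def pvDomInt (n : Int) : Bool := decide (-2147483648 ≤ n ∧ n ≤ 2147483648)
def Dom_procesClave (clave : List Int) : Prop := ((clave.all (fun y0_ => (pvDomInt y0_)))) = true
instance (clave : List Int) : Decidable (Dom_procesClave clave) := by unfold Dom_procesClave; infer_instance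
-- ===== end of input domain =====

-- ===== PORT A =====
-- Port of A: nested quadratic loops; lis[j] ranks patched incrementally, pos written on every patch.
-- (loop bodies named so the invariant lemmas below can speak about them)
def pvInnerA (clave : List Int) (i : Int) (s : Int × List Int × List Int) (j : Int) :
    Int × List Int × List Int :=
  if PySem.List.pyGetD clave j 0 ≤ PySem.List.pyGetD clave i 0 then
    (s.1 + 1, s.2.1, s.2.2)
  else
    let lis' := PySem.List.pySetD s.2.1 j (PySem.List.pyGetD s.2.1 j 0 + 1)
    (s.1, lis', PySem.List.pySetD s.2.2 (PySem.List.pyGetD lis' j 0) (j + 1))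

def pvStepA (clave : List Int) (st : List Int × List Int) (i : Int) : List Int × List Int :=
  let inner := (PySem.List.pyRange 0 i 1).foldl (pvInnerA clave i) (1, st.1, st.2)
  (PySem.List.pySetD inner.2.1 i inner.1, PySem.List.pySetD inner.2.2 inner.1 (i + 1))

def procesClave (clave : List Int) : List Int × List Int :=
  let st :=
    (PySem.List.pyRange 0 (clave.length : Int) 1).foldl (pvStepA clave)
      (List.replicate clave.length 0, List.replicate (clave.length + 1) 0)
  (st.2, st.1)

-- ===== PORT B =====
-- Port of B: stable sort of the indices by (value, index), then one pass writing ranks.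
def pvStepB (st : List Int × List Int) (ri : Int × Int) : List Int × List Int :=
  (PySem.List.pySetD st.1 ri.2 ri.1, PySem.List.pySetD st.2 ri.1 (ri.2 + 1))

def procesClave_alt (clave : List Int) : List Int × List Int :=
  let order :=
    PySem.List.sorted2 (PySem.List.pyRange 0 (clave.length : Int) 1)
      (fun i => PySem.List.pyGetD clave i 0) (fun i => i)
  let st :=
    (PySem.List.enumerate order 1).foldl pvStepB
      (List.replicate clave.length 0, List.replicate (clave.length + 1) 0)
  (st.2, st.1)

-- ===== PRECONDITION & SPEC =====
def Spec_procesClave (clave : List Int) (out : List Int × List Int) : Prop := out = procesClave_alt clave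
instance (clave : List Int) (out : List Int × List Int) : Decidable (Spec_procesClave clave out) := by unfold Spec_procesClave; infer_instance

-- ===== CLAIM (what is proved, stated in full; the proofs are below) =====
def Claim_equal_procesClave : Prop := ∀ (clave : List Int), Dom_procesClave clave → Spec_procesClave clave (procesClave clave)

-- ===== LEMMAS AND PROOFS =====

-- value at a (Nat) index
def pvVK (clave : List Int) (j : Nat) : Int := clave.getD j 0
-- strict "stable" order on indices: by value, ties by original position
def pvLLb (clave : List Int) (j k : Nat) : Bool :=
  decide (pvVK clave j < pvVK clave k) || (decide (pvVK clave j = pvVK clave k) && decide (j < k))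
-- rank of index j among the first m indices
def pvRk (clave : List Int) (m j : Nat) : Nat := (List.range m).countP (fun t => pvLLb clave t j)
-- lis after the first m outer iterations of A
def pvLisS (clave : List Int) (m : Nat) : List Int :=
  (List.range clave.length).map (fun j => if j < m then ((pvRk clave m j + 1 : Nat) : Int) else 0)
-- pos entry q after the first m outer iterations of A
def pvFind (clave : List Int) (m q : Nat) : Int :=
  match (List.range m).find? (fun j => pvRk clave m j + 1 == q) with
  | some j => ((j + 1 : Nat) : Int)
  | none => 0
def pvPosS (clave : List Int) (m : Nat) : List Int :=
  (List.range (clave.length + 1)).map (fun q => pvFind clave m q)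
-- lis in the middle of outer iteration m (first t inner steps done)
def pvLisI (clave : List Int) (m t : Nat) : List Int :=
  (List.range clave.length).map (fun j =>
    if j < t then ((pvRk clave (m + 1) j + 1 : Nat) : Int)
    else if j < m then ((pvRk clave m j + 1 : Nat) : Int) else 0)
-- pos entry q in the middle of outer iteration m
def pvFindI (clave : List Int) (m t q : Nat) : Int :=
  match (List.range t).find? (fun j =>
      decide (pvVK clave m < pvVK clave j) && (pvRk clave m j + 2 == q)) with
  | some j => ((j + 1 : Nat) : Int)
  | none => pvFind clave m q
def pvPosI (clave : List Int) (m t : Nat) : List Int :=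
  (List.range (clave.length + 1)).map (fun q => pvFindI clave m t q)

-- the comparison sorted2 uses in B, on raw Int indices
def pvBI (clave : List Int) (a b : Int) : Bool :=
  decide (PySem.List.pyGetD clave a 0 < PySem.List.pyGetD clave b 0) ||
    (!decide (PySem.List.pyGetD clave b 0 < PySem.List.pyGetD clave a 0) && decide (a < b))
def pvOrd (clave : List Int) : List Int :=
  PySem.List.sorted2 (PySem.List.pyRange 0 (clave.length : Int) 1)
    (fun i => PySem.List.pyGetD clave i 0) (fun i => i)
-- B's state after the first t writes
def pvLisB (clave : List Int) (t : Nat) : List Int :=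
  (List.range clave.length).map (fun j =>
    if pvRk clave clave.length j < t then ((pvRk clave clave.length j + 1 : Nat) : Int) else 0)
def pvPosB (clave : List Int) (t : Nat) : List Int :=
  (List.range (clave.length + 1)).map (fun q =>
    if 1 ≤ q ∧ q ≤ t then PySem.List.pyGetD (pvOrd clave) ((q : Int) - 1) 0 + 1 else 0)

-- ---- order basics ----
theorem pvLL_trans (c : List Int) (a b d : Nat) (h1 : pvLLb c a b = true) (h2 : pvLLb c b d = true) :
    pvLLb c a d = true := by
  simp only [pvLLb, Bool.or_eq_true, Bool.and_eq_true, decide_eq_true_eq] at *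
  rcases h1 with h1 | ⟨h1, h1'⟩ <;> rcases h2 with h2 | ⟨h2, h2'⟩ <;>
    [left; left; left; right] <;> omega

theorem pvLL_irrefl (c : List Int) (a : Nat) : pvLLb c a a = false := by
  simp [pvLLb]

theorem pvLL_total (c : List Int) (a b : Nat) (h : a ≠ b) :
    pvLLb c a b = true ∨ pvLLb c b a = true := by
  simp only [pvLLb, Bool.or_eq_true, Bool.and_eq_true, decide_eq_true_eq]
  rcases lt_trichotomy (pvVK c a) (pvVK c b) with hv | hv | hv
  · left; left; exact hv
  · rcases Nat.lt_or_ge a b with hn | hn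
    · left; right; exact ⟨hv, hn⟩
    · right; right; exact ⟨hv.symm, by omega⟩
  · right; left; exact hv

-- ---- rank basics ----
theorem pvRk_lt (c : List Int) (m j : Nat) (hj : j < m) : pvRk c m j < m := by
  have h1 : (List.range m).countP (fun t => pvLLb c t j) ≤ m := by
    simpa using (List.countP_le_length (p := fun t => pvLLb c t j) (l := List.range m))
  have h2 : (List.range m).countP (fun t => pvLLb c t j) ≠ m := by
    intro h
    have h' : (List.range m).countP (fun t => pvLLb c t j) = (List.range m).length := by
      simpa using h
    have := List.countP_eq_length.mp h' j (by simpa using hj)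
    rw [pvLL_irrefl] at this
    cases this
  unfold pvRk; omega

theorem pvRk_succ (c : List Int) (m j : Nat) :
    pvRk c (m + 1) j = pvRk c m j + (if pvLLb c m j then 1 else 0) := by
  unfold pvRk
  rw [List.range_succ, List.countP_append]
  simp [List.countP_cons]

theorem pvCountP_lt {α : Type} (p q : α → Bool) (l : List α)
    (hmono : ∀ a ∈ l, p a = true → q a = true) (x : α) (hx : x ∈ l)
    (hpx : p x = false) (hqx : q x = true) : l.countP p < l.countP q := by
  induction l with
  | nil => cases hx
  | cons y l ih =>
    rcases List.mem_cons.mp hx with rfl | hx'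
    · rw [List.countP_cons, List.countP_cons, hpx, hqx]
      simp only [if_true, Bool.false_eq_true, if_false, Nat.add_zero]
      have := List.countP_mono_left (l := l) (fun a ha hpa => hmono a (List.mem_cons_of_mem _ ha) hpa)
      omega
    · rw [List.countP_cons, List.countP_cons]
      have h1 := ih (fun a ha hpa => hmono a (List.mem_cons_of_mem _ ha) hpa) hx'
      have h2 : (if p y = true then 1 else 0) ≤ (if q y = true then 1 else 0) := by
        by_cases hp : p y = true
        · rw [hp, hmono y (List.mem_cons_self) hp]
        · simp [hp]
      omega

theorem pvRk_strictMono (c : List Int) (m j k : Nat) (hj : j < m) (h : pvLLb c j k = true) :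
    pvRk c m j < pvRk c m k := by
  unfold pvRk
  refine pvCountP_lt _ _ _ (fun a _ hpa => pvLL_trans c a j k hpa h) j (by simpa using hj)
    (pvLL_irrefl c j) h

theorem pvRk_inj (c : List Int) (m j k : Nat) (hj : j < m) (hk : k < m)
    (h : pvRk c m j = pvRk c m k) : j = k := by
  by_contra hne
  rcases pvLL_total c j k hne with hl | hl
  · have := pvRk_strictMono c m j k hj hl; omega
  · have := pvRk_strictMono c m k j hk hl; omega

theorem pvRk_surj (c : List Int) (m q : Nat) (hq : q < m) : ∃ j, j < m ∧ pvRk c m j = q := by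
  have hinj : Function.Injective (fun i : Fin m => (⟨pvRk c m i.1, pvRk_lt c m i.1 i.2⟩ : Fin m)) := by
    intro a b hab
    exact Fin.ext (pvRk_inj c m a.1 b.1 a.2 b.2 (by simpa using congrArg Fin.val hab))
  have hsurj := Finite.injective_iff_surjective.mp hinj
  obtain ⟨i, hi⟩ := hsurj ⟨q, hq⟩
  exact ⟨i.1, i.2, by simpa using congrArg Fin.val hi⟩

-- ---- list helpers ----
theorem pvFindRangeUnique (m : Nat) (p : Nat → Bool) (j : Nat) (hj : j < m) (hpj : p j = true)
    (hU : ∀ k, k < m → p k = true → k = j) : (List.range m).find? p = some j := by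
  cases hf : (List.range m).find? p with
  | none => exact absurd hpj (by simpa using List.find?_eq_none.mp hf j (by simpa using hj))
  | some k =>
    have hk := List.find?_some hf
    have hkm : k < m := by simpa using List.mem_of_find?_eq_some hf
    rw [hU k hkm hk]

theorem pvSetMapRange {β : Type} (n i : Nat) (f : Nat → β) (v : β) (_hi : i < n) :
    ((List.range n).map f).set i v = (List.range n).map (fun k => if k = i then v else f k) := by
  apply List.ext_getElem
  · simp
  · intro k h1 h2
    simp only [List.getElem_set, List.getElem_map, List.getElem_range]
    have hk : k < n := by simpa using h2
    by_cases hik : i = k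
    · simp [hik]
    · simp [hik, Ne.symm hik]

theorem pvMapRangeZero (n : Nat) (g : Nat → Int) (h : ∀ j, j < n → g j = 0) :
    (List.range n).map g = List.replicate n 0 := by
  refine List.eq_replicate_iff.mpr ⟨by simp, ?_⟩
  intro b hb
  rcases List.mem_map.mp hb with ⟨j, hj, rfl⟩
  exact h j (by simpa using hj)

-- ---- A side ----
theorem pvLLb_lt_left (c : List Int) (t m : Nat) (ht : t < m) :
    pvLLb c m t = decide (pvVK c m < pvVK c t) := by
  unfold pvLLb
  have : decide (m < t) = false := by simp; omega
  rw [this]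
  simp

theorem pvA_inner (c : List Int) (m : Nat) (hm : m < c.length) (t : Nat) (ht : t ≤ m) :
    (PySem.List.pyRange 0 (t : Int) 1).foldl (pvInnerA c (m : Int)) (1, pvLisS c m, pvPosS c m) =
      (((1 + (List.range t).countP (fun k => decide (pvVK c k ≤ pvVK c m)) : Nat) : Int),
        pvLisI c m t, pvPosI c m t) := by
  induction t with
  | zero =>
    have hr : PySem.List.pyRange 0 ((0 : Nat) : Int) 1 = [] := by
      rw [PySem.List.pyRange_zero_natCast]; simp
    rw [hr]
    simp only [List.foldl_nil, List.range_zero, List.countP_nil]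
    refine Prod.ext (by norm_num) (Prod.ext ?_ ?_)
    · show pvLisS c m = pvLisI c m 0
      unfold pvLisS pvLisI
      apply List.map_congr_left
      intro j _
      rw [if_neg (Nat.not_lt_zero j)]
    · show pvPosS c m = pvPosI c m 0
      unfold pvPosS pvPosI
      apply List.map_congr_left
      intro q _
      unfold pvFindI
      rw [List.range_zero, List.find?_nil]
  | succ t ih =>
    have htm : t < m := by omega
    have htn : t < c.length := by omega
    have hcast : ((t + 1 : Nat) : Int) = (t : Int) + 1 := by push_cast; ring
    rw [hcast, PySem.List.pyRange_one_succ_right (by positivity), List.foldl_append,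
      ih (by omega)]
    simp only [List.foldl_cons, List.foldl_nil]
    unfold pvInnerA
    rw [PySem.List.pyGetD_natCast c t 0, PySem.List.pyGetD_natCast c m 0]
    by_cases hle : c.getD t 0 ≤ c.getD m 0
    · rw [if_pos hle]
      have hLL : pvLLb c m t = false := by
        rw [pvLLb_lt_left c t m htm]
        simp only [decide_eq_false_iff_not, pvVK]
        omega
      refine Prod.ext ?_ (Prod.ext ?_ ?_)
      · show ((1 + (List.range t).countP _ : Nat) : Int) + 1 = _
        rw [List.range_succ, List.countP_append]
        have hdle : decide (pvVK c t ≤ pvVK c m) = true := by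
          simp only [pvVK, decide_eq_true_eq]; exact hle
        have hone : (List.countP (fun k => decide (pvVK c k ≤ pvVK c m)) [t]) = 1 := by
          rw [List.countP_cons, List.countP_nil]
          simp [hdle]
        rw [hone]
        push_cast
        ring
      · show pvLisI c m t = pvLisI c m (t + 1)
        unfold pvLisI
        apply List.map_congr_left
        intro j _
        by_cases hjt : j < t
        · rw [if_pos hjt, if_pos (show j < t + 1 by omega)]
        · by_cases hjt2 : j = t
          · subst hjt2
            rw [if_neg hjt, if_pos (Nat.lt_succ_self j), if_pos htm]
            simp [pvRk_succ, hLL]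
          · rw [if_neg hjt, if_neg (show ¬ j < t + 1 by omega)]
      · show pvPosI c m t = pvPosI c m (t + 1)
        unfold pvPosI
        apply List.map_congr_left
        intro q _
        unfold pvFindI
        rw [List.range_succ, List.find?_append]
        have hd : decide (pvVK c m < pvVK c t) = false := by
          simp only [decide_eq_false_iff_not, pvVK]
          omega
        have hnone : List.find? (fun j =>
            decide (pvVK c m < pvVK c j) && (pvRk c m j + 2 == q)) [t] = none := by
          rw [List.find?_cons_of_neg, List.find?_nil]
          simp [hd]
        rw [hnone, Option.or_none]
    · rw [if_neg hle]
      have hvm : c.getD m 0 < c.getD t 0 := by omega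
      have hd : decide (pvVK c m < pvVK c t) = true := by
        simp only [decide_eq_true_eq, pvVK]
        omega
      have hLL : pvLLb c m t = true := by
        rw [pvLLb_lt_left c t m htm, hd]
      have hrkt : pvRk c (m + 1) t = pvRk c m t + 1 := by
        rw [pvRk_succ, hLL]
        simp
      have hget : PySem.List.pyGetD (pvLisI c m t) (t : Int) 0 = ((pvRk c m t + 1 : Nat) : Int) := by
        rw [PySem.List.pyGetD_natCast]
        unfold pvLisI
        rw [PySem.List.getD_map_range _ _ _ _ htn, if_neg (lt_irrefl t), if_pos htm]
      have hlis : PySem.List.pySetD (pvLisI c m t) (t : Int)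
          (PySem.List.pyGetD (pvLisI c m t) (t : Int) 0 + 1) = pvLisI c m (t + 1) := by
        rw [hget, PySem.List.pySetD_natCast]
        unfold pvLisI
        rw [pvSetMapRange c.length t _ _ htn]
        apply List.map_congr_left
        intro k _
        by_cases hkt : k = t
        · subst hkt
          rw [if_pos rfl, if_pos (Nat.lt_succ_self k), hrkt]
          push_cast
          ring
        · rw [if_neg hkt]
          by_cases hklt : k < t
          · rw [if_pos hklt, if_pos (show k < t + 1 by omega)]
          · rw [if_neg hklt, if_neg (show ¬ k < t + 1 by omega)]
      refine Prod.ext ?_ (Prod.ext ?_ ?_)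
      · show ((1 + (List.range t).countP _ : Nat) : Int) = _
        rw [List.range_succ, List.countP_append]
        have hdle : decide (pvVK c t ≤ pvVK c m) = false := by
          simp only [pvVK, decide_eq_false_iff_not]; omega
        have hzero : (List.countP (fun k => decide (pvVK c k ≤ pvVK c m)) [t]) = 0 := by
          rw [List.countP_cons, List.countP_nil]
          simp [hdle]
        rw [hzero]
        norm_num
      · exact hlis
      · show PySem.List.pySetD (pvPosI c m t)
            (PySem.List.pyGetD (PySem.List.pySetD (pvLisI c m t) (t : Int)
              (PySem.List.pyGetD (pvLisI c m t) (t : Int) 0 + 1)) (t : Int) 0)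
            ((t : Int) + 1) = pvPosI c m (t + 1)
        rw [hlis]
        have hget2 : PySem.List.pyGetD (pvLisI c m (t + 1)) (t : Int) 0
            = ((pvRk c m t + 2 : Nat) : Int) := by
          rw [PySem.List.pyGetD_natCast]
          unfold pvLisI
          rw [PySem.List.getD_map_range _ _ _ _ htn, if_pos (Nat.lt_succ_self t), hrkt]
        rw [hget2, PySem.List.pySetD_natCast]
        unfold pvPosI
        rw [pvSetMapRange (c.length + 1) (pvRk c m t + 2) _ _
          (by have := pvRk_lt c m t htm; omega)]
        apply List.map_congr_left
        intro q _
        unfold pvFindI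
        rw [List.range_succ, List.find?_append]
        by_cases hqv : q = pvRk c m t + 2
        · rw [if_pos hqv]
          have h1 : List.find? (fun j =>
              decide (pvVK c m < pvVK c j) && (pvRk c m j + 2 == q)) (List.range t) = none := by
            rw [List.find?_eq_none]
            intro k hk
            have hkt : k < t := by simpa using hk
            simp only [Bool.and_eq_true, decide_eq_true_eq, beq_iff_eq, not_and]
            intro _ hrk
            have hkeq : k = t := pvRk_inj c m k t (by omega) htm (by omega)
            omega
          have h2 : List.find? (fun j =>
              decide (pvVK c m < pvVK c j) && (pvRk c m j + 2 == q)) [t] = some t := by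
            rw [List.find?_cons_of_pos]
            simp only [Bool.and_eq_true, decide_eq_true_eq, beq_iff_eq]
            exact ⟨by simpa [pvVK] using hvm, hqv.symm⟩
          rw [h1, h2]
          show (t : Int) + 1 = ((t + 1 : Nat) : Int)
          push_cast
          ring
        · rw [if_neg hqv]
          have h2 : List.find? (fun j =>
              decide (pvVK c m < pvVK c j) && (pvRk c m j + 2 == q)) [t] = none := by
            rw [List.find?_cons_of_neg, List.find?_nil]
            simp only [Bool.and_eq_true, decide_eq_true_eq, beq_iff_eq, not_and]
            intro _
            omega
          rw [h2, Option.or_none]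

theorem pvA_step (c : List Int) (m : Nat) (hm : m < c.length) :
    pvStepA c (pvLisS c m, pvPosS c m) (m : Int) = (pvLisS c (m + 1), pvPosS c (m + 1)) := by
  have hRm : pvRk c (m + 1) m = pvRk c m m := by
    rw [pvRk_succ]
    simp [pvLL_irrefl]
  have hcnt : (List.range m).countP (fun k => decide (pvVK c k ≤ pvVK c m)) = pvRk c (m + 1) m := by
    rw [hRm]
    unfold pvRk
    apply List.countP_congr
    intro k hk
    have hkm : k < m := by simpa using hk
    unfold pvLLb
    have hdk : decide (k < m) = true := by simpa using hkm
    rcases lt_trichotomy (pvVK c k) (pvVK c m) with hv | hv | hv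
    · simp [hv, le_of_lt hv]
    · simp [hv, hdk]
    · have h1 : ¬ pvVK c k ≤ pvVK c m := by omega
      have h2 : ¬ pvVK c k < pvVK c m := by omega
      have h3 : ¬ pvVK c k = pvVK c m := by omega
      simp [h1, h2, h3]
  have hX : ((1 + (List.range m).countP (fun k => decide (pvVK c k ≤ pvVK c m)) : Nat) : Int)
      = ((pvRk c (m + 1) m + 1 : Nat) : Int) := by
    rw [hcnt]
    push_cast
    ring
  have hRlt : pvRk c (m + 1) m < m + 1 := pvRk_lt c (m + 1) m (Nat.lt_succ_self m)
  unfold pvStepA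
  dsimp only
  rw [pvA_inner c m hm m le_rfl]
  dsimp only
  rw [hX]
  refine Prod.ext ?_ ?_
  · show PySem.List.pySetD (pvLisI c m m) (m : Int) ((pvRk c (m + 1) m + 1 : Nat) : Int)
        = pvLisS c (m + 1)
    rw [PySem.List.pySetD_natCast]
    unfold pvLisI pvLisS
    rw [pvSetMapRange c.length m _ _ hm]
    apply List.map_congr_left
    intro k _
    by_cases hkm : k = m
    · subst hkm
      rw [if_pos rfl, if_pos (Nat.lt_succ_self k)]
    · rw [if_neg hkm]
      by_cases hklt : k < m
      · rw [if_pos hklt, if_pos (show k < m + 1 by omega)]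
      · rw [if_neg hklt, if_neg hklt, if_neg (show ¬ k < m + 1 by omega)]
  · show PySem.List.pySetD (pvPosI c m m) ((pvRk c (m + 1) m + 1 : Nat) : Int) ((m : Int) + 1)
        = pvPosS c (m + 1)
    rw [PySem.List.pySetD_natCast]
    unfold pvPosI pvPosS
    rw [pvSetMapRange (c.length + 1) (pvRk c (m + 1) m + 1) _ _ (by omega)]
    apply List.map_congr_left
    intro q _
    unfold pvFind
    rw [List.range_succ, List.find?_append]
    by_cases hq : q = pvRk c (m + 1) m + 1
    · rw [if_pos hq]
      have h1 : List.find? (fun j => pvRk c (m + 1) j + 1 == q) (List.range m) = none := by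
        rw [List.find?_eq_none]
        intro k hk
        have hkm : k < m := by simpa using hk
        simp only [beq_iff_eq]
        intro hpk
        have : k = m := pvRk_inj c (m + 1) k m (by omega) (Nat.lt_succ_self m) (by omega)
        omega
      have h2 : List.find? (fun j => pvRk c (m + 1) j + 1 == q) [m] = some m := by
        rw [List.find?_cons_of_pos]
        simp only [beq_iff_eq]
        omega
      rw [h1, h2]
      show (m : Int) + 1 = ((m + 1 : Nat) : Int)
      push_cast
      ring
    · rw [if_neg hq]
      have h2 : List.find? (fun j => pvRk c (m + 1) j + 1 == q) [m] = none := by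
        rw [List.find?_cons_of_neg, List.find?_nil]
        simp only [beq_iff_eq]
        omega
      rw [h2, Option.or_none]
      unfold pvFindI
      cases hA : List.find? (fun j => pvRk c (m + 1) j + 1 == q) (List.range m) with
      | some j =>
        have hpj : pvRk c (m + 1) j + 1 = q := by simpa using List.find?_some hA
        have hjm : j < m := by simpa using List.mem_of_find?_eq_some hA
        have huniqA : ∀ k, k < m + 1 → pvRk c (m + 1) k + 1 = q → k = j := by
          intro k hk hpk
          exact pvRk_inj c (m + 1) k j hk (by omega) (by omega)
        by_cases hvj : pvVK c m < pvVK c j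
        · have hLLmj : pvLLb c m j = true := by
            rw [pvLLb_lt_left c j m hjm]
            simpa using hvj
          have hrkj : pvRk c (m + 1) j = pvRk c m j + 1 := by
            rw [pvRk_succ, hLLmj]
            simp
          have hfind2 : List.find? (fun j' =>
              decide (pvVK c m < pvVK c j') && (pvRk c m j' + 2 == q)) (List.range m)
              = some j := by
            refine pvFindRangeUnique m _ j hjm ?_ ?_
            · simp only [Bool.and_eq_true, decide_eq_true_eq, beq_iff_eq]
              exact ⟨hvj, by omega⟩
            · intro k hk hpk
              simp only [Bool.and_eq_true, decide_eq_true_eq, beq_iff_eq] at hpk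
              have hLLmk : pvLLb c m k = true := by
                rw [pvLLb_lt_left c k m hk]
                simpa using hpk.1
              have hrkk : pvRk c (m + 1) k = pvRk c m k + 1 := by
                rw [pvRk_succ, hLLmk]
                simp
              exact huniqA k (by omega) (by omega)
          rw [hfind2]
        · have hLLmj : pvLLb c m j = false := by
            rw [pvLLb_lt_left c j m hjm]
            simpa using hvj
          have hrkj : pvRk c (m + 1) j = pvRk c m j := by
            rw [pvRk_succ, hLLmj]
            simp
          have hfind2 : List.find? (fun j' =>
              decide (pvVK c m < pvVK c j') && (pvRk c m j' + 2 == q)) (List.range m)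
              = none := by
            rw [List.find?_eq_none]
            intro k hk
            have hkm : k < m := by simpa using hk
            simp only [Bool.and_eq_true, decide_eq_true_eq, beq_iff_eq, not_and]
            intro hvk hpk
            have hLLmk : pvLLb c m k = true := by
              rw [pvLLb_lt_left c k m hkm]
              simpa using hvk
            have hrkk : pvRk c (m + 1) k = pvRk c m k + 1 := by
              rw [pvRk_succ, hLLmk]
              simp
            have : k = j := huniqA k (by omega) (by omega)
            subst this
            exact absurd hvk hvj
          rw [hfind2]
          unfold pvFind
          have hfind3 : List.find? (fun j' => pvRk c m j' + 1 == q) (List.range m)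
              = some j := by
            refine pvFindRangeUnique m _ j hjm (by simp only [beq_iff_eq]; omega) ?_
            intro k hk hpk
            simp only [beq_iff_eq] at hpk
            exact pvRk_inj c m k j hk hjm (by omega)
          rw [hfind3]
      | none =>
        have hnoA : ∀ k, k < m → ¬ (pvRk c (m + 1) k + 1 = q) := by
          intro k hk hpk
          have := List.find?_eq_none.mp hA k (by simpa using hk)
          simp only [beq_iff_eq] at this
          exact this hpk
        have hfind2 : List.find? (fun j' =>
            decide (pvVK c m < pvVK c j') && (pvRk c m j' + 2 == q)) (List.range m)
            = none := by
          rw [List.find?_eq_none]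
          intro k hk
          have hkm : k < m := by simpa using hk
          simp only [Bool.and_eq_true, decide_eq_true_eq, beq_iff_eq, not_and]
          intro hvk hpk
          have hLLmk : pvLLb c m k = true := by
            rw [pvLLb_lt_left c k m hkm]
            simpa using hvk
          have hrkk : pvRk c (m + 1) k = pvRk c m k + 1 := by
            rw [pvRk_succ, hLLmk]
            simp
          exact hnoA k hkm (by omega)
        rw [hfind2]
        unfold pvFind
        have hfind3 : List.find? (fun j' => pvRk c m j' + 1 == q) (List.range m) = none := by
          rw [List.find?_eq_none]
          intro k hk
          have hkm : k < m := by simpa using hk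
          simp only [beq_iff_eq]
          intro hpk
          have hqm : q - 1 < m + 1 := by
            have := pvRk_lt c m k hkm
            omega
          obtain ⟨j', hj', hrj'⟩ := pvRk_surj c (m + 1) (q - 1) hqm
          have hq1 : 1 ≤ q := by omega
          by_cases hjm' : j' = m
          · subst hjm'
            omega
          · exact hnoA j' (by omega) (by omega)
        rw [hfind3]

theorem pvA_outer (c : List Int) (m : Nat) (hm : m ≤ c.length) :
    (PySem.List.pyRange 0 (m : Int) 1).foldl (pvStepA c)
        (List.replicate c.length 0, List.replicate (c.length + 1) 0) =
      (pvLisS c m, pvPosS c m) := by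
  induction m with
  | zero =>
    have hr : PySem.List.pyRange 0 ((0 : Nat) : Int) 1 = [] := by
      rw [PySem.List.pyRange_zero_natCast]; simp
    rw [hr]
    simp only [List.foldl_nil]
    refine Prod.ext ?_ ?_
    · show _ = pvLisS c 0
      exact (pvMapRangeZero _ _ (by intro j _; simp)).symm
    · show _ = pvPosS c 0
      refine (pvMapRangeZero _ _ ?_).symm
      intro q _
      unfold pvFind
      rw [List.find?_eq_none.mpr (by intro k hk; simp at hk)]
  | succ m ih =>
    have hcast : ((m + 1 : Nat) : Int) = (m : Int) + 1 := by push_cast; ring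
    rw [hcast, PySem.List.pyRange_one_succ_right (by positivity), List.foldl_append,
      ih (by omega)]
    simp only [List.foldl_cons, List.foldl_nil]
    exact pvA_step c m (by omega)

theorem pvA_eq (c : List Int) : procesClave c = (pvPosS c c.length, pvLisS c c.length) := by
  unfold procesClave
  exact congrArg (fun p : List Int × List Int => (p.2, p.1)) (pvA_outer c c.length le_rfl)

-- ---- B side: insertion-sort characterisation ----
theorem pvInsertBy_pairwise {α : Type} (before : α → α → Bool)
    (hasym : ∀ a b, before a b = true → before b a = false)
    (htrans : ∀ a b d, before a b = true → before b d = true → before a d = true)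
    (x : α) (ys : List α) (h : ys.Pairwise (fun a b => before b a = false)) :
    (PySem.List.insertBy before x ys).Pairwise (fun a b => before b a = false) := by
  induction ys with
  | nil => simp [PySem.List.insertBy]
  | cons y ys ih =>
    rw [PySem.List.insertBy]
    rcases List.pairwise_cons.mp h with ⟨hy, hys⟩
    by_cases hxy : before x y = true
    · simp only [hxy, if_true]
      refine List.pairwise_cons.mpr ⟨?_, h⟩
      intro z hz
      rcases List.mem_cons.mp hz with rfl | hz'
      · exact hasym x z hxy
      · by_contra hzx
        have hzx' : before z x = true := by
          cases hb : before z x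
          · exact absurd hb hzx
          · rfl
        have := htrans z x y hzx' hxy
        rw [hy z hz'] at this
        cases this
    · simp only [hxy, Bool.false_eq_true, if_false]
      refine List.pairwise_cons.mpr ⟨?_, ih hys⟩
      intro z hz
      rcases (PySem.List.mem_insertBy before x z ys).mp hz with rfl | hz'
      · cases hb : before z y
        · rfl
        · exact absurd hb (by simpa using hxy)
      · exact hy z hz' 

theorem pvBI_asymm (c : List Int) (a b : Int) (h : pvBI c a b = true) : pvBI c b a = false := by
  simp only [pvBI, Bool.or_eq_true, Bool.and_eq_true, Bool.not_eq_eq_eq_not, Bool.not_true,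
    decide_eq_true_eq, decide_eq_false_iff_not] at h
  simp only [pvBI, Bool.or_eq_false_iff, Bool.and_eq_false_iff, Bool.not_eq_eq_eq_not,
    Bool.not_false, decide_eq_false_iff_not, decide_eq_true_eq]
  rcases h with h | ⟨h1, h2⟩
  · exact ⟨by omega, Or.inl (by omega)⟩
  · exact ⟨by omega, Or.inr (by omega)⟩

theorem pvBI_trans (c : List Int) (a b d : Int) (h1 : pvBI c a b = true) (h2 : pvBI c b d = true) :
    pvBI c a d = true := by
  simp only [pvBI, Bool.or_eq_true, Bool.and_eq_true, Bool.not_eq_eq_eq_not, Bool.not_true,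
    decide_eq_true_eq, decide_eq_false_iff_not] at *
  rcases h1 with h1 | ⟨h1, h1'⟩ <;> rcases h2 with h2 | ⟨h2, h2'⟩
  · left; omega
  · left; omega
  · left; omega
  · right; exact ⟨by omega, by omega⟩

theorem pvBI_total (c : List Int) (a b : Int) (h : a ≠ b) :
    pvBI c a b = true ∨ pvBI c b a = true := by
  simp only [pvBI, Bool.or_eq_true, Bool.and_eq_true, Bool.not_eq_eq_eq_not, Bool.not_true,
    decide_eq_true_eq, decide_eq_false_iff_not]
  rcases lt_trichotomy (PySem.List.pyGetD c a 0) (PySem.List.pyGetD c b 0) with hv | hv | hv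
  · left; left; exact hv
  · rcases lt_or_gt_of_ne h with hn | hn
    · left; right; exact ⟨by omega, hn⟩
    · right; right; exact ⟨by omega, hn⟩
  · right; left; exact hv

theorem pvOrd_perm (c : List Int) : (pvOrd c).Perm (PySem.List.pyRange 0 (c.length : Int) 1) := by
  exact PySem.List.sorted2_perm _ _ _ _

theorem pvFoldlInsertBy_pairwise {α : Type} (before : α → α → Bool)
    (hasym : ∀ a b, before a b = true → before b a = false)
    (htrans : ∀ a b d, before a b = true → before b d = true → before a d = true)
    (xs : List α) (acc : List α) (h : acc.Pairwise (fun a b => before b a = false)) :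
    (xs.foldl (fun acc x => PySem.List.insertBy before x acc) acc).Pairwise
      (fun a b => before b a = false) := by
  induction xs generalizing acc with
  | nil => exact h
  | cons x xs ih => exact ih _ (pvInsertBy_pairwise before hasym htrans x acc h)

theorem pvOrd_pairwise (c : List Int) : (pvOrd c).Pairwise (fun a b => pvBI c a b = true) := by
  have hS : (pvOrd c).Pairwise (fun a b => pvBI c b a = false) := by
    have := pvFoldlInsertBy_pairwise (pvBI c) (pvBI_asymm c) (pvBI_trans c)
      (PySem.List.pyRange 0 (c.length : Int) 1) [] (by simp)
    simpa [pvOrd, PySem.List.sorted2, pvBI] using this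
  have hnd : (pvOrd c).Nodup := ((pvOrd_perm c).nodup_iff).mpr (PySem.List.nodup_pyRange_one _ _)
  have := hS.and hnd
  refine this.imp ?_
  rintro a b ⟨h1, h2⟩
  rcases pvBI_total c a b h2 with h | h
  · exact h
  · rw [h1] at h; cases h

theorem pvCountP_pairwise {α : Type} (R : α → α → Bool)
    (hasym : ∀ a b, R a b = true → R b a = false) (l : List α)
    (hp : l.Pairwise (fun a b => R a b = true)) (p : Nat) (hpl : p < l.length) :
    l.countP (fun a => R a l[p]) = p := by
  induction l generalizing p with
  | nil => simp at hpl
  | cons x rest ih =>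
    rcases List.pairwise_cons.mp hp with ⟨hx, hrest⟩
    cases p with
    | zero =>
      simp only [List.getElem_cons_zero, List.countP_cons]
      have hxx : R x x = false := by
        cases hb : R x x
        · rfl
        · have h2 := hasym x x hb; rw [hb] at h2; exact h2
      rw [hxx]
      simp only [Bool.false_eq_true, if_false, Nat.add_zero]
      rw [List.countP_eq_zero]
      intro z hz
      rw [hasym x z (hx z hz)]
      simp
    | succ p =>
      have hpr : p < rest.length := by simpa using hpl
      simp only [List.getElem_cons_succ, List.countP_cons]
      have hxr : R x rest[p] = true := hx rest[p] (List.getElem_mem hpr)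
      rw [hxr, ih hrest p hpr]
      simp

theorem pvBI_natCast (c : List Int) (j k : Nat) : pvBI c (j : Int) (k : Int) = pvLLb c j k := by
  simp only [pvBI, pvLLb, PySem.List.pyGetD_natCast, pvVK, List.getD_eq_getElem?_getD]
  rcases lt_trichotomy ((getElem? c j).getD 0) ((getElem? c k).getD 0) with hv | hv | hv
  · simp [hv]
  · simp [hv]
  · simp [not_lt_of_gt hv, hv, ne_of_gt hv]

theorem pvOrd_length (c : List Int) : (pvOrd c).length = c.length := by
  rw [(pvOrd_perm c).length_eq, PySem.List.pyRange_zero_natCast, List.length_map,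
    List.length_range]

theorem pvOrd_rank (c : List Int) (p : Nat) (hp : p < c.length) :
    ∃ j, j < c.length ∧ (pvOrd c)[p]? = some (j : Int) ∧ pvRk c c.length j = p := by
  have hlen : p < (pvOrd c).length := by rw [pvOrd_length]; exact hp
  have hmem : (pvOrd c)[p] ∈ PySem.List.pyRange 0 (c.length : Int) 1 :=
    (pvOrd_perm c).mem_iff.mp (List.getElem_mem hlen)
  rcases PySem.List.mem_pyRange_one.mp hmem with ⟨h0, h1⟩
  refine ⟨(pvOrd c)[p].toNat, by omega, ?_, ?_⟩
  · rw [List.getElem?_eq_getElem hlen, Int.toNat_of_nonneg h0]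
  · have hcast : ((pvOrd c)[p].toNat : Int) = (pvOrd c)[p] := Int.toNat_of_nonneg h0
    have hcount : (pvOrd c).countP (fun a => pvBI c a (pvOrd c)[p]) = p :=
      pvCountP_pairwise (pvBI c) (pvBI_asymm c) (pvOrd c) (pvOrd_pairwise c) p hlen
    have hperm := (pvOrd_perm c).countP_eq (p := fun a => pvBI c a (pvOrd c)[p])
    rw [hperm, PySem.List.pyRange_zero_natCast, List.countP_map] at hcount
    unfold pvRk
    refine Eq.trans ?_ hcount
    apply List.countP_congr
    intro t ht
    have h3 := pvBI_natCast c t ((pvOrd c)[p].toNat)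
    rw [hcast] at h3
    simp only [Function.comp_apply]
    rw [h3]

theorem pvB_step (c : List Int) (t : Nat) (htn : t < c.length) :
    pvStepB (pvLisB c t, pvPosB c t) ((t : Int) + 1, (pvOrd c)[t]'(by rw [pvOrd_length]; exact htn)) =
      (pvLisB c (t + 1), pvPosB c (t + 1)) := by
  have hlen : t < (pvOrd c).length := by rw [pvOrd_length]; exact htn
  obtain ⟨j, hj, hsome, hrk⟩ := pvOrd_rank c t htn
  have hOt : (pvOrd c)[t] = (j : Int) := by
    rw [List.getElem?_eq_getElem hlen] at hsome
    exact Option.some.inj hsome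
  unfold pvStepB
  refine Prod.ext ?_ ?_
  · show PySem.List.pySetD (pvLisB c t) (pvOrd c)[t] ((t : Int) + 1) = pvLisB c (t + 1)
    rw [hOt, PySem.List.pySetD_natCast]
    unfold pvLisB
    rw [pvSetMapRange c.length j _ _ hj]
    apply List.map_congr_left
    intro k hk
    have hkn : k < c.length := by simpa using hk
    by_cases hkj : k = j
    · subst hkj
      rw [if_pos rfl, hrk, if_pos (Nat.lt_succ_self t)]
      push_cast
      ring
    · rw [if_neg hkj]
      have hne : pvRk c c.length k ≠ t := by
        intro h
        exact hkj (pvRk_inj c c.length k j hkn hj (by omega))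
      by_cases hlt : pvRk c c.length k < t
      · rw [if_pos hlt, if_pos (by omega)]
      · rw [if_neg hlt, if_neg (by omega)]
  · show PySem.List.pySetD (pvPosB c t) ((t : Int) + 1) ((pvOrd c)[t] + 1) = pvPosB c (t + 1)
    have hidx : ((t : Int) + 1) = ((t + 1 : Nat) : Int) := by push_cast; ring
    rw [hidx, PySem.List.pySetD_natCast]
    unfold pvPosB
    rw [pvSetMapRange (c.length + 1) (t + 1) _ _ (by omega)]
    apply List.map_congr_left
    intro q hq
    have hqn : q < c.length + 1 := by simpa using hq
    by_cases hqt : q = t + 1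
    · subst hqt
      rw [if_pos rfl, if_pos (by omega)]
      have hidx2 : ((t + 1 : Nat) : Int) - 1 = ((t : Nat) : Int) := by push_cast; ring
      rw [hidx2, PySem.List.pyGetD_natCast, List.getD_eq_getElem?_getD, hsome,
        Option.getD_some, hOt]
    · rw [if_neg hqt]
      by_cases hc : 1 ≤ q ∧ q ≤ t
      · rw [if_pos hc, if_pos (by omega)]
      · rw [if_neg hc, if_neg (by omega)]

theorem pvB_fold (c : List Int) (t : Nat) (ht : t ≤ c.length) :
    (PySem.List.enumerate (List.drop t (pvOrd c)) ((t : Int) + 1)).foldl pvStepB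
        (pvLisB c t, pvPosB c t) =
      (pvLisB c c.length, pvPosB c c.length) := by
  have main : ∀ k t, t ≤ c.length → c.length - t = k →
      (PySem.List.enumerate (List.drop t (pvOrd c)) ((t : Int) + 1)).foldl pvStepB
          (pvLisB c t, pvPosB c t) =
        (pvLisB c c.length, pvPosB c c.length) := by
    intro k
    induction k with
    | zero =>
      intro t ht hk
      have htn : t = c.length := by omega
      subst htn
      rw [List.drop_of_length_le (by rw [pvOrd_length])]
      rfl
    | succ k ih =>
      intro t ht hk
      have htn : t < c.length := by omega
      have hlen : t < (pvOrd c).length := by rw [pvOrd_length]; exact htn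
      rw [List.drop_eq_getElem_cons hlen]
      have hcons : PySem.List.enumerate ((pvOrd c)[t] :: List.drop (t + 1) (pvOrd c)) ((t : Int) + 1)
          = ((t : Int) + 1, (pvOrd c)[t]) ::
              PySem.List.enumerate (List.drop (t + 1) (pvOrd c)) ((t : Int) + 1 + 1) := rfl
      rw [hcons, List.foldl_cons, pvB_step c t htn]
      have hstart : ((t : Int) + 1 + 1) = (((t + 1 : Nat)) : Int) + 1 := by push_cast; ring
      rw [hstart]
      exact ih (t + 1) (by omega) (by omega)
  exact main (c.length - t) t ht rfl

theorem pvB_eq (c : List Int) :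
    procesClave_alt c = (pvPosB c c.length, pvLisB c c.length) := by
  have hlis : List.replicate c.length (0 : Int) = pvLisB c 0 :=
    (pvMapRangeZero _ _ (by intro j _; simp)).symm
  have hpos : List.replicate (c.length + 1) (0 : Int) = pvPosB c 0 :=
    (pvMapRangeZero _ _ (by intro q _; rw [if_neg (by omega)])).symm
  have hfold := pvB_fold c 0 (Nat.zero_le _)
  simp only [List.drop_zero, Nat.cast_zero, zero_add] at hfold
  unfold pvOrd at hfold
  unfold procesClave_alt
  rw [hlis, hpos]
  exact congrArg (fun p : List Int × List Int => (p.2, p.1)) hfold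

-- ---- glue ----
theorem pvLis_glue (c : List Int) : pvLisB c c.length = pvLisS c c.length := by
  unfold pvLisB pvLisS
  apply List.map_congr_left
  intro j hj
  have hjn : j < c.length := by simpa using hj
  simp [hjn, pvRk_lt c c.length j hjn]

theorem pvPos_glue (c : List Int) : pvPosB c c.length = pvPosS c c.length := by
  unfold pvPosB pvPosS
  apply List.map_congr_left
  intro q hq
  have hqn : q < c.length + 1 := by simpa using hq
  by_cases h1 : 1 ≤ q
  · obtain ⟨j, hj, hsome, hrk⟩ := pvOrd_rank c (q - 1) (by omega)
    have hcond : 1 ≤ q ∧ q ≤ c.length := ⟨h1, by omega⟩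
    rw [if_pos hcond]
    have hidx : ((q : Int) - 1) = ((q - 1 : Nat) : Int) := by omega
    rw [hidx, PySem.List.pyGetD_natCast, List.getD_eq_getElem?_getD, hsome]
    have hfind : (List.range c.length).find? (fun k => pvRk c c.length k + 1 == q) = some j := by
      refine pvFindRangeUnique _ _ j hj (by simp [hrk]; omega) ?_
      intro k hk hpk
      refine pvRk_inj c c.length k j hk hj ?_
      have hpk' : pvRk c c.length k + 1 = q := by simpa using hpk
      omega
    unfold pvFind
    rw [hfind]
    simp only [Option.getD_some]
    push_cast
    ring
  · have hq0 : q = 0 := by omega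
    rw [if_neg (by omega)]
    unfold pvFind
    rw [List.find?_eq_none.mpr (by intro k _; simp [hq0])]

-- ===== VERDICT (by name: the statement is the Claim_ definition above) =====
theorem procesClave_spec : Claim_equal_procesClave := by
  intro clave _
  show _ = _
  rw [pvA_eq, pvB_eq, pvLis_glue, pvPos_glue]
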